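-- pv_equiv track=rewrite | github.com/Apop85/Tools | Python/enigma_encryption_2.py | change_it
-- ===== SOURCE A (Python) =====
-- def change_it(message,values):
--     char_list=list(message)
--     for value in values:
--         for i in range(len(char_list)):
--             if value[0].upper() == char_list[i].upper():
--                 char_list[i] = value[1].upper()
--             elif value[1].upper() == char_list[i].upper():
--                 char_list[i] = value[0].upper()
--     return ''.join(char_list)
-- ===== SOURCE B (Python) =====
-- def change_it(message, values):
--     mapping = {}
--     for ch in set(message):
--         cur = ch
--         for v in values:
--             if v[0].upper() == cur.upper():
--                 cur = v[1].upper()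
--             elif v[1].upper() == cur.upper():
--                 cur = v[0].upper()
--         mapping[ch] = cur
--     return ''.join(mapping[ch] for ch in message)
-- ===== Notes on version B (the rewrite author's own statement) =====
-- stated objective: faster
-- what changed: Instead of rescanning the whole message once per swap pair, B folds the swap sequence once per distinct character of the message into a lookup table and then maps the message through it in one pass.
import Mathlib
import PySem

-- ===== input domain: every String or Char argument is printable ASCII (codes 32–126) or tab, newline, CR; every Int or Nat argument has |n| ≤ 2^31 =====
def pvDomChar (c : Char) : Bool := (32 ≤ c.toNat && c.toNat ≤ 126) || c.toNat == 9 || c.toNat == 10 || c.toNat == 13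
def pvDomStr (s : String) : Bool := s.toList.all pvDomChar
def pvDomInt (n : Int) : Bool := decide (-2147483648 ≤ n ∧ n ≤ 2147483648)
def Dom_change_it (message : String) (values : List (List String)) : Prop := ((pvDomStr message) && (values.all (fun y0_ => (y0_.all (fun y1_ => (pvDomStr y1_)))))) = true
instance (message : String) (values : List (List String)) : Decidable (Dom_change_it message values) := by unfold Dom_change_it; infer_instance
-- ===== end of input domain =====

-- B builds the composed swap mapping once per distinct message character and maps the
-- message through it in one pass, instead of A's rescan of the message per swap pair.

-- ===== PORT A =====
-- one iteration of A's inner-loop body on one cell of char_list (value[0]/value[1]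
-- would raise IndexError on a short value; Pre_ excludes that, fallback leaves the cell)
def pvCellStepA (value : List String) (cell : String) : String :=
  match value with
  | v0 :: v1 :: _ =>
    if PySem.Str.upper v0 = PySem.Str.upper cell then PySem.Str.upper v1
    else if PySem.Str.upper v1 = PySem.Str.upper cell then PySem.Str.upper v0
    else cell
  | _ => cell

def change_it (message : String) (values : List (List String)) : String :=
  let char_list := message.toList.map (fun c => String.mk [c])
  let final := values.foldl (fun cl value => cl.map (fun cell => pvCellStepA value cell)) char_list
  PySem.Str.join "" final

-- ===== PORT B =====
-- B's inner fold step: one swap pair applied to the tracked value cur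
def pvCurStepB (cur : String) (v : List String) : String :=
  match v with
  | v0 :: v1 :: _ =>
    if PySem.Str.upper v0 = PySem.Str.upper cur then PySem.Str.upper v1
    else if PySem.Str.upper v1 = PySem.Str.upper cur then PySem.Str.upper v0
    else cur
  | _ => cur

def change_it_alt (message : String) (values : List (List String)) : String :=
  let chars := PySem.Set.ofList message.toList
  let mapping : PySem.Dict Char String :=
    chars.foldl (fun d ch => d.insert ch (values.foldl pvCurStepB (String.mk [ch]))) PySem.Dict.empty
  PySem.Str.join "" (message.toList.map (fun ch => mapping.getD ch ""))

-- ===== PRECONDITION & SPEC =====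
-- Pre_ excludes only inputs on which A raises IndexError: a nonempty message together
-- with some swap entry of fewer than two elements.
def Pre_change_it (message : String) (values : List (List String)) : Prop :=
  message = "" ∨ ∀ v ∈ values, 2 ≤ v.length
instance (message : String) (values : List (List String)) : Decidable (Pre_change_it message values) := by unfold Pre_change_it; infer_instance
def pvWitness_change_it : String × List (List String) := ("Hello", [["h", "x"], ["e", "l"]])
def Spec_change_it (message : String) (values : List (List String)) (out : String) : Prop := out = change_it_alt message values
instance (message : String) (values : List (List String)) (out : String) : Decidable (Spec_change_it message values out) := by unfold Spec_change_it; infer_instance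

-- ===== CLAIM (what is proved, stated in full; the proofs are below) =====
def Claim_equal_change_it : Prop := ∀ (message : String) (values : List (List String)), Dom_change_it message values → Pre_change_it message values → Spec_change_it message values (change_it message values)

-- ===== LEMMAS AND PROOFS =====

-- A's per-pair pass over the cells commutes into one per-cell fold over the pairs
theorem foldl_map_comm (values : List (List String)) (cl : List String) :
    values.foldl (fun cl value => cl.map (fun cell => pvCellStepA value cell)) cl
      = cl.map (fun cell => values.foldl (fun c v => pvCellStepA v c) cell) := by
  induction values generalizing cl with
  | nil => simp
  | cons v vs ih => simp [List.foldl_cons, ih, List.map_map]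

-- the two step functions are the same function of (pair, cell)
theorem step_eq (v : List String) (c : String) : pvCellStepA v c = pvCurStepB c v := rfl

-- lookup in a dict built by inserting g c at every c of a list
theorem getD_foldl_insert_untouched {κ ν : Type} [BEq κ] [LawfulBEq κ] (g : κ → ν) (dflt : ν)
    (l : List κ) (d : PySem.Dict κ ν) (c : κ) (hc : c ∉ l) :
    (l.foldl (fun d x => d.insert x (g x)) d).getD c dflt = d.getD c dflt := by
  induction l generalizing d with
  | nil => rfl
  | cons x xs ih =>
    simp only [List.foldl_cons]
    rw [ih _ (fun h => hc (List.mem_cons_of_mem _ h)),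
        PySem.Dict.getD_insert_of_ne _ _ _ (fun h => hc (by rw [h]; exact List.mem_cons_self))]

theorem getD_foldl_insert_fun {κ ν : Type} [BEq κ] [LawfulBEq κ] (g : κ → ν) (dflt : ν)
    (l : List κ) (d : PySem.Dict κ ν) (c : κ) (hc : c ∈ l) :
    (l.foldl (fun d x => d.insert x (g x)) d).getD c dflt = g c := by
  induction l generalizing d with
  | nil => cases hc
  | cons x xs ih =>
    simp only [List.foldl_cons]
    by_cases hx : c ∈ xs
    · exact ih _ hx
    · have hcx : c = x := by
        rcases List.mem_cons.mp hc with h | h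
        · exact h
        · exact absurd h hx
      subst hcx
      rw [getD_foldl_insert_untouched g dflt xs _ c hx, PySem.Dict.getD_insert_self]

-- ===== VERDICT (by name: the statement is the Claim_ definition above) =====
theorem change_it_spec : Claim_equal_change_it := by
  intro message values _ _
  unfold Spec_change_it
  simp only [change_it, change_it_alt, foldl_map_comm, List.map_map]
  congr 1
  apply List.map_congr_left
  intro c hc
  rw [getD_foldl_insert_fun (fun ch => values.foldl pvCurStepB (String.mk [ch])) "" _ _ c
      ((PySem.Set.mem_ofList _ _).mpr hc)]
  simp [Function.comp, step_eq]
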